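-- pv_equiv track=rewrite | github.com/aim-biu-lab/b-ires-test1 | backend/app/services/path_simulator.py | _generate_latin_square
-- ===== SOURCE A (Python) =====
-- from typing import Dict, List, Any, Optional, Tuple
--
-- def _generate_latin_square(n: int) -> List[List[int]]:
--     """Generate a Latin Square of size n"""
--     if n <= 0:
--         return []
--     square = []
--     for i in range(n):
--         row = [(i + j) % n for j in range(n)]
--         square.append(row)
--     return square
-- ===== SOURCE B (Python) =====
-- from typing import List
--
-- def _generate_latin_square(n: int) -> List[List[int]]:
--     """Generate a Latin Square of size n"""
--     if n <= 0:
--         return []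
--     row = list(range(n))
--     square = [row]
--     for _ in range(n - 1):
--         row = row[1:] + row[:1]
--         square.append(row)
--     return square
-- ===== Notes on version B (the rewrite author's own statement) =====
-- stated objective: alternative
-- what changed: Instead of computing (i+j)%n for every cell with nested loops, B builds the first row as range(n) and derives each subsequent row by rotating the previous row one step left, carrying the previous row as running state (no per-cell modular arithmetic).
import Mathlib
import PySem

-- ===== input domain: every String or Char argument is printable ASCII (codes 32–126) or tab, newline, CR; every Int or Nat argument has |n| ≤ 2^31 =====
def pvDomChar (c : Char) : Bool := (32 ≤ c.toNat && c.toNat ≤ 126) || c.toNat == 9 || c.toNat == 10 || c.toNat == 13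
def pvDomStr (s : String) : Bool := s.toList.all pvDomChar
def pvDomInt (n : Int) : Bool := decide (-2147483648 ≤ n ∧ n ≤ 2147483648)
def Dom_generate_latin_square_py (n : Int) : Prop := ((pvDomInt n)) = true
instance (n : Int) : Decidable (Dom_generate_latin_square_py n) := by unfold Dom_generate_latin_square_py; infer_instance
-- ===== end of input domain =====

-- B builds each row by rotating the previous one instead of computing (i+j)%n per cell.

-- ===== PORT A =====
def generate_latin_square_py (n : Int) : List (List Int) :=
  if n ≤ 0 then []
  else
    (PySem.List.pyRange 0 n 1).foldl
      (fun square i =>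
        square ++ [(PySem.List.pyRange 0 n 1).map (fun j => PySem.Int.mod (i + j) n)])
      []

-- ===== PORT B =====
def generate_latin_square_py_alt (n : Int) : List (List Int) :=
  if n ≤ 0 then []
  else
    let first := PySem.List.pyRange 0 n 1
    let st := (PySem.List.pyRange 0 (n - 1) 1).foldl
      (fun (st : List Int × List (List Int)) _ =>
        let row := PySem.List.slice st.1 (some 1) none ++ PySem.List.slice st.1 none (some 1)
        (row, st.2 ++ [row]))
      (first, [first])
    st.2

-- ===== PRECONDITION & SPEC =====
def Spec_generate_latin_square_py (n : Int) (out : List (List Int)) : Prop := out = generate_latin_square_py_alt n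
instance (n : Int) (out : List (List Int)) : Decidable (Spec_generate_latin_square_py n out) := by unfold Spec_generate_latin_square_py; infer_instance

-- ===== CLAIM (what is proved, stated in full; the proofs are below) =====
def Claim_equal_generate_latin_square_py : Prop := ∀ (n : Int), Dom_generate_latin_square_py n → Spec_generate_latin_square_py n (generate_latin_square_py n)

-- ===== LEMMAS AND PROOFS =====

-- row i of the square, exactly as A computes it
def pvRow (n : Int) (i : Int) : List Int :=
  (PySem.List.pyRange 0 n 1).map (fun j => PySem.Int.mod (i + j) n)

lemma pv_foldl_append_map {α β : Type} (f : α → β) :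
    ∀ (L : List α) (acc : List β),
      L.foldl (fun acc i => acc ++ [f i]) acc = acc ++ L.map f := by
  intro L
  induction L with
  | nil => simp
  | cons a t ih => intro acc; simp [List.foldl, ih]

lemma pv_mod_add_self (i n : Int) : PySem.Int.mod (i + n) n = PySem.Int.mod i n := by
  rcases eq_or_ne n 0 with h | h
  · simp [h]
  · simp [PySem.Int.mod]

lemma pvRow_zero (n : Int) (hn : 0 < n) : pvRow n 0 = PySem.List.pyRange 0 n 1 := by
  unfold pvRow
  have : ∀ j ∈ PySem.List.pyRange 0 n 1, PySem.Int.mod (0 + j) n = id j := by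
    intro j hj
    rw [PySem.List.mem_pyRange_one] at hj
    rw [zero_add, PySem.Int.mod_eq_emod_of_pos hn, Int.emod_eq_of_lt hj.1 hj.2]
    rfl
  rw [List.map_congr_left this, List.map_id]

lemma pvRow_rotate (n : Int) (hn : 0 < n) (i : Int) :
    (pvRow n i).tail ++ (pvRow n i).take 1 = pvRow n (i + 1) := by
  have hcons : PySem.List.pyRange 0 n 1 = 0 :: PySem.List.pyRange 1 n 1 :=
    PySem.List.pyRange_one_cons hn
  have hsucc : PySem.List.pyRange 0 n 1 = PySem.List.pyRange 0 (n - 1) 1 ++ [n - 1] := by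
    have := PySem.List.pyRange_one_succ_right (a := 0) (b := n - 1) (by omega)
    rw [show n - 1 + 1 = n by ring] at this
    exact this
  unfold pvRow
  conv_lhs => rw [hcons]
  conv_rhs => rw [hsucc]
  simp only [List.map_cons, List.tail_cons,
    List.map_append, List.map_nil]
  congr 1
  · -- shifted tail equals the first n-1 entries of the next row
    rw [PySem.List.pyRange_one 1 n, PySem.List.pyRange_one 0 (n - 1)]
    rw [List.map_map, List.map_map]
    simp only [Int.sub_zero]
    apply List.map_congr_left
    intro k _
    simp only [Function.comp]
    congr 1
    ring
  · -- the wrapped first entry: (i + n) % n = i % n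
    rw [show i + 1 + (n - 1) = i + n by ring, pv_mod_add_self, add_zero]
    simp

-- B's loop invariant: from state (pvRow n i, acc), folding over any list of length c
-- yields (pvRow n (i+c), acc ++ [rows i+1 .. i+c]).
lemma pvB_fold (n : Int) (hn : 0 < n) :
    ∀ (L : List Int) (i : Int) (acc : List (List Int)),
      L.foldl
        (fun (st : List Int × List (List Int)) _ =>
          let row := PySem.List.slice st.1 (some 1) none ++ PySem.List.slice st.1 none (some 1)
          (row, st.2 ++ [row]))
        (pvRow n i, acc)
      = (pvRow n (i + L.length),
         acc ++ (List.range L.length).map (fun t : Nat => pvRow n (i + 1 + (t : Int)))) := by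
  intro L
  induction L with
  | nil => simp
  | cons a t ih =>
    intro i acc
    have hrot : PySem.List.slice (pvRow n i) (some 1) none
        ++ PySem.List.slice (pvRow n i) none (some 1) = pvRow n (i + 1) := by
      rw [PySem.List.slice_from_one]
      have h1 : PySem.List.slice (pvRow n i) none (some ((1 : Nat) : Int)) = (pvRow n i).take 1 :=
        PySem.List.slice_to_natCast _ _
      simp only [Nat.cast_one] at h1
      rw [h1]
      exact pvRow_rotate n hn i
    simp only [List.foldl_cons, hrot]
    rw [ih (i + 1) (acc ++ [pvRow n (i + 1)])]
    simp only [Prod.mk.injEq, List.length_cons]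
    refine ⟨?_, ?_⟩
    · congr 1; push_cast; ring
    · rw [List.range_succ_eq_map]
      simp only [List.map_cons, List.map_map, Nat.cast_zero, add_zero,
        List.append_assoc, List.singleton_append]
      congr 2
      apply List.map_congr_left
      intro k _
      simp only [Function.comp]
      congr 1
      push_cast
      ring

lemma pvA_eq (n : Int) (hn : 0 < n) :
    generate_latin_square_py n = (PySem.List.pyRange 0 n 1).map (pvRow n) := by
  unfold generate_latin_square_py
  rw [if_neg (by omega), pv_foldl_append_map, List.nil_append]
  rfl

lemma pvB_eq (n : Int) (hn : 0 < n) :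
    generate_latin_square_py_alt n = (PySem.List.pyRange 0 n 1).map (pvRow n) := by
  unfold generate_latin_square_py_alt
  rw [if_neg (by omega)]
  dsimp only
  conv_lhs => rw [← pvRow_zero n hn]
  rw [pvB_fold n hn]
  have hlen : (PySem.List.pyRange 0 (n - 1) 1).length = n.toNat - 1 := by
    rw [PySem.List.length_pyRange_one]; omega
  rw [hlen]
  obtain ⟨m, hm⟩ : ∃ m, n.toNat = m + 1 := ⟨n.toNat - 1, by omega⟩
  conv_rhs => rw [PySem.List.pyRange_one]
  rw [Int.sub_zero, hm, Nat.add_sub_cancel, List.range_succ_eq_map]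
  simp only [List.map_cons, List.map_map, Nat.cast_zero, add_zero, List.singleton_append]
  congr 1
  apply List.map_congr_left
  intro k _
  simp only [Function.comp]
  congr 1
  push_cast
  ring

-- ===== VERDICT (by name: the statement is the Claim_ definition above) =====
theorem generate_latin_square_py_spec : Claim_equal_generate_latin_square_py := by
  intro n _
  unfold Spec_generate_latin_square_py
  by_cases hn : n ≤ 0
  · simp [generate_latin_square_py, generate_latin_square_py_alt, hn]
  · rw [pvA_eq n (by omega), pvB_eq n (by omega)]
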